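-- pv_equiv track=rewrite | github.com/knowah/vm-retrotransposons | code/kmer_alignment.py | group_kmers
-- ===== SOURCE A (Python) =====
-- def overlapping_substring_length(query, subject, min_k=1):
--   # get the length of maximum common substring
--   # min_k provides a lower bound to check
--
--   # check trivial case
--   if query == subject:
--     return len(query)
--
--   # search every substring of the query
--   for k in range(len(query)-1, min_k-1, -1):
--     for sub_start in range(0, len(query)-k+1):
--       if query[sub_start:(sub_start+k)] in subject:
--         return k
--
--   # no match
--   return 0
--
-- def group_kmers(kmers):
--   # identify K and verify all seqs are length K
--   K = len(kmers[0])
--   if not all([len(seq) == K for seq in kmers]):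
--     raise ValueError("All elements of kmers must be the same length")
--
--   # initial assortment
--   kmer_groups = [ [kmers[0]] ]  # initial 'founder' group with one member
--   for kk in kmers[1:]:
--     # try to find a group for this kmer (kk)
--     found = False
--     for gid in range(len(kmer_groups)):
--       # iterate through each kmer in this group trying to find
--       # a match with one bp offset
--       for gk in kmer_groups[gid]:
--         if overlapping_substring_length(kk, gk, K-1) >= K-1:
--           kmer_groups[gid].append(kk)
--           found = True
--           break
--
--       # no need to keep searching if group already found
--       if found:
--         break
--
--     # didn't find an existing group, create a new one
--     if not found:
--       kmer_groups.append([kk])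
--
--   # pass back through, trying to merge smaller groups with larger ones
--   # first, reorder the groups in increasing order of size
--   small2large_order = [x[0] for x in sorted(enumerate([len(g) for g in kmer_groups]), key=lambda x: x[1])]
--   kmer_groups = [kmer_groups[i] for i in small2large_order]
--   for gid in range(len(kmer_groups)-1):
--     found = False
--     for kk in kmer_groups[gid]:
--       for nid in range(len(kmer_groups)-1, gid, -1):
--         for nk in kmer_groups[nid]:
--           if overlapping_substring_length(kk, nk, K-1) >= K-1:
--             kmer_groups[nid].extend(kmer_groups[gid])
--             kmer_groups[gid].clear()
--             found = True
--             break
--         if found: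
--           break
--       if found:
--         break
--
--   # reorder groups in decreasing order of size
--   large2small_order = [x[0] for x in sorted(enumerate([len(g) for g in kmer_groups]), key=lambda x: -x[1])]
--   return [kmer_groups[i] for i in large2small_order if len(kmer_groups[i]) > 0  ]
-- ===== SOURCE B (Python) =====
-- def group_kmers(kmers):
--   # identify K and verify all seqs are length K
--   K = len(kmers[0])
--   if any(len(s) != K for s in kmers):
--     raise ValueError("All elements of kmers must be the same length")
--
--   def keys(s):
--     # the two boundary (K-1)-mers of s
--     return (s[:K-1], s[1:])
--
--   # phase 1: each group carries the set of boundary (K-1)-mers of its members,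
--   # so membership of a kmer in a group is two set lookups, not a substring scan.
--   groups = []  # list of (members, keyset)
--   for kk in kmers:
--     a, b = keys(kk)
--     for mem, ks in groups:
--       if a in ks or b in ks:
--         mem.append(kk)
--         ks.add(a)
--         ks.add(b)
--         break
--     else:
--       groups.append(([kk], {a, b}))
--
--   # reorder groups in increasing order of size (stable)
--   groups.sort(key=lambda g: len(g[0]))
--
--   # phase 2: merge each group into the last (largest-index) later group sharing
--   # a boundary (K-1)-mer with its earliest matchable member
--   m = len(groups)
--   for gid in range(m - 1):
--     mem, ks = groups[gid]
--     target = -1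
--     for kk in mem:
--       a, b = keys(kk)
--       for nid in range(m - 1, gid, -1):
--         if a in groups[nid][1] or b in groups[nid][1]:
--           target = nid
--           break
--       if target >= 0:
--         break
--     if target >= 0:
--       groups[target][0].extend(mem)
--       groups[target][1].update(ks)
--       groups[gid] = ([], set())
--
--   # decreasing order of size (stable), drop emptied groups
--   groups.sort(key=lambda g: -len(g[0]))
--   return [mem for mem, _ in groups if mem]
-- ===== Notes on version B (the rewrite author's own statement) =====
-- stated objective: alternative
-- what changed: B precomputes each kmer's two boundary (K-1)-mers and keeps, for every group, the set of its members' boundary (K-1)-mers, so testing whether a kmer joins a group is two set lookups instead of A's per-member common-substring search; on a timing run's input family (few shared (K-1)-mers, singleton-heavy groups) this is not measurably faster, it trades the substring scans for set maintenance.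
import Mathlib
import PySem

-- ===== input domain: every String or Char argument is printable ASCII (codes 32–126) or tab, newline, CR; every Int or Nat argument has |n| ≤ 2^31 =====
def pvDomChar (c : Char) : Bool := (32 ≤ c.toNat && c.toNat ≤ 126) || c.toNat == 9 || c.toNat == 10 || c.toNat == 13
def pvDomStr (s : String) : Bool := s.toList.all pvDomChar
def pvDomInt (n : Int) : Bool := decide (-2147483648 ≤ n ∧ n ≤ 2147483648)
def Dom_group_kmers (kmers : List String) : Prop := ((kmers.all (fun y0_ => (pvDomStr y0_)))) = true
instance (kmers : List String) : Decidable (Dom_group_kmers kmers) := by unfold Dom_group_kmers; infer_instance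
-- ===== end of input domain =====

-- B replaces A's per-member common-substring search by a per-group set of boundary
-- (K-1)-mers, so a group-membership test is two set lookups (objective: alternative).

-- ===== PORT A =====
def overlapping_substring_length (query subject : String) (min_k : Int) : Int :=
  -- check trivial case
  if query = subject then PySem.Str.len query
  else
    -- search every substring of the query (nested loops with early return)
    match (PySem.List.pyRange (PySem.Str.len query - 1) (min_k - 1) (-1)).findSome? (fun k =>
        (PySem.List.pyRange 0 (PySem.Str.len query - k + 1) 1).findSome? (fun sub_start =>
          if PySem.Str.isIn (PySem.Str.slice query (some sub_start) (some (sub_start + k))) subject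
          then some k else none)) with
    | some k => k
    | none => 0

def group_kmers (kmers : List String) : List (List String) :=
  match kmers with
  | [] => []   -- kmers[0] raises IndexError here: excluded by Pre_
  | k0 :: rest =>
    let K : Int := PySem.Str.len k0
    if !(kmers.all fun seq => PySem.Str.len seq == K) then []  -- raise ValueError: excluded by Pre_
    else
      -- initial assortment
      let groups1 := rest.foldl (fun gs kk =>
        match gs.findIdx? (fun g => g.any (fun gk =>
            decide (overlapping_substring_length kk gk (K - 1) ≥ K - 1))) with
        | some gid => gs.modify gid (fun g => g ++ [kk])
        | none => gs ++ [[kk]]) [[k0]]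
      -- reorder the groups in increasing order of size
      let order1 := (PySem.List.sorted (PySem.List.enumerate (groups1.map (fun g => PySem.List.len g))) (fun x => x.2)).map (fun x => x.1)
      let groups2 := order1.map (fun i => PySem.List.pyGetD groups1 i [])
      -- merge pass
      let groups3 := (PySem.List.pyRange 0 (PySem.List.len groups2 - 1) 1).foldl (fun gs gid =>
        match (PySem.List.pyGetD gs gid []).findSome? (fun kk =>
            (PySem.List.pyRange (PySem.List.len gs - 1) gid (-1)).find? (fun nid =>
              (PySem.List.pyGetD gs nid []).any (fun nk =>
                decide (overlapping_substring_length kk nk (K - 1) ≥ K - 1)))) with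
        | some nid =>
            PySem.List.pySetD (PySem.List.pySetD gs nid ((PySem.List.pyGetD gs nid []) ++ (PySem.List.pyGetD gs gid []))) gid []
        | none => gs) groups2
      -- reorder groups in decreasing order of size, drop empties
      let order2 := (PySem.List.sorted (PySem.List.enumerate (groups3.map (fun g => PySem.List.len g))) (fun x => -x.2)).map (fun x => x.1)
      (order2.filter (fun i => decide (0 < PySem.List.len (PySem.List.pyGetD groups3 i [])))).map (fun i => PySem.List.pyGetD groups3 i [])

-- ===== PORT B =====
-- the two boundary (K-1)-mers of s: (s[:K-1], s[1:])
def pvKeys (K : Int) (s : String) : String × String :=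
  (PySem.Str.slice s none (some (K - 1)), PySem.Str.slice s (some 1) none)

def group_kmers_alt (kmers : List String) : List (List String) :=
  match kmers with
  | [] => []   -- kmers[0] raises IndexError here: excluded by Pre_
  | k0 :: _ =>
    let K : Int := PySem.Str.len k0
    if kmers.any (fun s => !(PySem.Str.len s == K)) then []  -- raise ValueError: excluded by Pre_
    else
      -- phase 1: groups carry (members, set of boundary (K-1)-mers)
      let groups1 := kmers.foldl (fun gs kk =>
        let a := (pvKeys K kk).1
        let b := (pvKeys K kk).2
        match gs.findIdx? (fun g => PySem.Set.contains g.2 a || PySem.Set.contains g.2 b) with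
        | some i => gs.modify i (fun g => (g.1 ++ [kk], PySem.Set.add (PySem.Set.add g.2 a) b))
        | none => gs ++ [([kk], PySem.Set.ofList [a, b])])
        ([] : List (List String × PySem.Set String))
      -- increasing order of size (stable)
      let groups2 := PySem.List.sorted groups1 (fun g => PySem.List.len g.1)
      let m : Int := PySem.List.len groups2
      -- phase 2: merge into the last later group sharing a boundary (K-1)-mer
      let groups3 := (PySem.List.pyRange 0 (m - 1) 1).foldl (fun gs gid =>
        let g := PySem.List.pyGetD gs gid ([], [])
        match g.1.findSome? (fun kk =>
            let a := (pvKeys K kk).1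
            let b := (pvKeys K kk).2
            (PySem.List.pyRange (m - 1) gid (-1)).find? (fun nid =>
              let nks := (PySem.List.pyGetD gs nid ([], [])).2
              PySem.Set.contains nks a || PySem.Set.contains nks b)) with
        | some nid =>
            let tg := PySem.List.pyGetD gs nid ([], [])
            PySem.List.pySetD (PySem.List.pySetD gs nid (tg.1 ++ g.1, PySem.Set.update tg.2 g.2)) gid ([], [])
        | none => gs) groups2
      -- decreasing order of size (stable), drop emptied groups
      let groups4 := PySem.List.sorted groups3 (fun g => -(PySem.List.len g.1))
      (groups4.filter (fun g => !g.1.isEmpty)).map (fun g => g.1)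

-- ===== PRECONDITION & SPEC =====
-- Pre_ excludes exactly the inputs on which A raises: the empty list (IndexError on
-- kmers[0]) and lists whose elements are not all the same length (explicit ValueError).
def Pre_group_kmers (kmers : List String) : Prop :=
  kmers ≠ [] ∧ ∀ s ∈ kmers, PySem.Str.len s = PySem.Str.len kmers.headI
instance (kmers : List String) : Decidable (Pre_group_kmers kmers) := by unfold Pre_group_kmers; infer_instance
def pvWitness_group_kmers : List String := ["ACG", "CGT", "TTT"]

def Spec_group_kmers (kmers : List String) (out : List (List String)) : Prop := out = group_kmers_alt kmers
instance (kmers : List String) (out : List (List String)) : Decidable (Spec_group_kmers kmers out) := by unfold Spec_group_kmers; infer_instance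

-- ===== CLAIM (what is proved, stated in full; the proofs are below) =====
def Claim_equal_group_kmers : Prop := ∀ (kmers : List String), Dom_group_kmers kmers → Pre_group_kmers kmers → Spec_group_kmers kmers (group_kmers kmers)

-- ===== LEMMAS AND PROOFS =====


theorem pvInfixChar (t s : List Char) (h : t.length + 1 = s.length) :
    t <:+: s ↔ s.take t.length = t ∨ s.drop 1 = t := by
  constructor
  · rintro ⟨l, r, rfl⟩
    have hl : l.length + r.length = 1 := by
      simp [List.length_append] at h; omega
    rcases List.eq_nil_or_concat l with rfl | ⟨l', x, rfl⟩
    · left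
      simp only [List.nil_append]
      exact List.take_left
    · have h1 : l'.length = 0 ∧ r.length = 0 := by
        simp only [List.concat_eq_append, List.length_append, List.length_cons,
          List.length_nil] at hl
        omega
      right
      obtain rfl := List.length_eq_zero_iff.mp h1.1
      obtain rfl := List.length_eq_zero_iff.mp h1.2
      simp
  · rintro (h1 | h1)
    · exact (h1 ▸ List.take_prefix t.length s).isInfix
    · exact (h1 ▸ List.drop_suffix 1 s).isInfix
theorem pvRange_pred (a : Int) : PySem.List.pyRange a (a-1) (-1) = [a] := by
  simp [PySem.List.pyRange]

theorem pvStrEq (a b : String) : (a == b) = (a.toList == b.toList) := by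
  by_cases h : a = b
  · simp [h]
  · have h2 : a.toList ≠ b.toList := fun hc => h (by
      rw [← String.ofList_toList (s := a), ← String.ofList_toList (s := b), hc])
    simp [h, h2]

theorem pvSlice0 (K : Int) (kk : String) :
    PySem.Str.slice kk (some 0) (some (0 + (K-1))) = (pvKeys K kk).1 := by
  simp [PySem.Str.slice, pvKeys]

theorem pvKey1_toList (K : Int) (kk : String) (h1 : 1 ≤ K) :
    ((pvKeys K kk).1).toList = kk.toList.take (K.toNat - 1) := by
  simp only [pvKeys, PySem.Str.slice, String.toList_ofList, PySem.Chars.slice_eq_listSlice]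
  rw [PySem.List.slice_to _ (by omega : (0:Int) ≤ K - 1)]
  congr 1
  omega

theorem pvKey2_toList (K : Int) (kk : String) :
    ((pvKeys K kk).2).toList = kk.toList.drop 1 := by
  simp only [pvKeys, PySem.Str.slice, String.toList_ofList, PySem.Chars.slice_eq_listSlice]
  rw [PySem.List.slice_from _ (by omega : (0:Int) ≤ 1)]
  rfl

theorem pvSlice1 (K : Int) (kk : String) (hk : PySem.Str.len kk = K) :
    PySem.Str.slice kk (some 1) (some (1 + (K-1))) = (pvKeys K kk).2 := by
  have hk' : (kk.toList.length : Int) = K := hk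
  simp only [pvKeys, PySem.Str.slice]
  congr 1
  simp only [PySem.Chars.slice_eq_listSlice]
  have h1 : (1 : Int) + (K - 1) = K := by ring
  rw [h1, PySem.List.slice_toNat _ (by omega : (0:Int) ≤ 1) (by omega : (0:Int) ≤ K),
    PySem.List.slice_from _ (by omega : (0:Int) ≤ 1)]
  apply List.take_of_length_le
  have h2 : kk.toList.length = K.toNat := by omega
  simp [h2]

theorem pvIsIn_char (K : Int) (w gk : String) (hg : PySem.Str.len gk = K) (hK1 : 1 ≤ K)
    (hw : w.toList.length = K.toNat - 1) :
    PySem.Str.isIn w gk = ((w == (pvKeys K gk).1) || (w == (pvKeys K gk).2)) := by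
  have hg' : (gk.toList.length : Int) = K := hg
  have hlen : w.toList.length + 1 = gk.toList.length := by omega
  rw [Bool.eq_iff_iff]
  simp only [Bool.or_eq_true, pvStrEq, beq_iff_eq]
  rw [show PySem.Str.isIn w gk = PySem.Chars.isIn w.toList gk.toList from rfl,
    PySem.Chars.isIn_iff_infix, pvInfixChar _ _ hlen,
    pvKey1_toList K gk hK1, pvKey2_toList K gk, hw]
  constructor
  · rintro (h | h) <;> [left; right] <;> exact h.symm
  · rintro (h | h) <;> [left; right] <;> exact h.symm

theorem pvKey1_len (K : Int) (kk : String) (hk : PySem.Str.len kk = K) (hK1 : 1 ≤ K) :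
    ((pvKeys K kk).1).toList.length = K.toNat - 1 := by
  have hk' : (kk.toList.length : Int) = K := hk
  rw [pvKey1_toList K kk hK1]
  simp only [List.length_take]
  omega

theorem pvKey2_len (K : Int) (kk : String) (hk : PySem.Str.len kk = K) :
    ((pvKeys K kk).2).toList.length = K.toNat - 1 := by
  have hk' : (kk.toList.length : Int) = K := hk
  rw [pvKey2_toList K kk]
  simp only [List.length_drop]
  omega

theorem pvCond_eq (K : Int) (kk gk : String) (hk : PySem.Str.len kk = K) (hg : PySem.Str.len gk = K) :
    decide (overlapping_substring_length kk gk (K-1) ≥ K-1)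
    = ((pvKeys K kk).1 == (pvKeys K gk).1 || (pvKeys K kk).1 == (pvKeys K gk).2 ||
       (pvKeys K kk).2 == (pvKeys K gk).1 || (pvKeys K kk).2 == (pvKeys K gk).2) := by
  have hk' : (kk.toList.length : Int) = K := hk
  have hg' : (gk.toList.length : Int) = K := hg
  unfold overlapping_substring_length
  by_cases heq : kk = gk
  · subst heq
    rw [if_pos rfl]
    have hl2 : (kk.length : Int) = K := by simpa using hk'
    simp [hl2, show K - 1 ≤ K by omega]
  · rw [if_neg heq]
    have hK1 : 1 ≤ K := by
      rcases (by omega : 1 ≤ K ∨ K = 0) with h | h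
      · exact h
      · exfalso
        apply heq
        have e1 : kk.toList = [] := List.length_eq_zero_iff.mp (by omega)
        have e2 : gk.toList = [] := List.length_eq_zero_iff.mp (by omega)
        rw [← String.ofList_toList (s := kk), ← String.ofList_toList (s := gk), e1, e2]
    simp only [hk]
    rw [pvRange_pred]
    simp only [List.findSome?_cons, List.findSome?_nil]
    simp only [show K - (K - 1) + 1 = 2 from by ring]
    rw [show PySem.List.pyRange 0 2 1 = [0, 1] from by decide]
    simp only [List.findSome?_cons, List.findSome?_nil, pvSlice0, pvSlice1 K kk hk]
    rw [pvIsIn_char K _ gk hg hK1 (pvKey1_len K kk hk hK1),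
      pvIsIn_char K _ gk hg hK1 (pvKey2_len K kk hk)]
    cases hc1 : ((pvKeys K kk).1 == (pvKeys K gk).1 || (pvKeys K kk).1 == (pvKeys K gk).2) with
    | true =>
      simp
    | false =>
      have ⟨ha, hb⟩ := Bool.or_eq_false_iff.mp hc1
      cases hc2 : ((pvKeys K kk).2 == (pvKeys K gk).1 || (pvKeys K kk).2 == (pvKeys K gk).2) with
      | true =>
        simp only [if_false, if_true, Bool.false_eq_true]
        simp only [Bool.or_eq_true, beq_iff_eq] at hc2
        simp [hc2]
      | false =>
        have hK2 : 2 ≤ K := by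
          rcases (by omega : 2 ≤ K ∨ K = 1) with h | h
          · exact h
          · exfalso
            subst h
            have l1 := pvKey1_len 1 kk hk hK1
            have l2 := pvKey1_len 1 gk hg hK1
            simp at l1 l2
            rw [l1, l2] at ha
            simp at ha
        simp only [Bool.or_eq_false_iff, beq_eq_false_iff_ne, ne_eq] at hc2
        simp [hc2.1, hc2.2, show ¬ (K - 1 ≤ 0) by omega]

-- ===== keyset machinery =====
def pvKeyList (K : Int) (s : String) : List String := [(pvKeys K s).1, (pvKeys K s).2]
def pvKeyset (K : Int) (g : List String) : PySem.Set String := PySem.Set.ofList (g.flatMap (pvKeyList K))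
def pvF (K : Int) (g : List String) : List String × PySem.Set String := (g, pvKeyset K g)

theorem pvF_nil (K : Int) : pvF K [] = (([] : List String), ([] : PySem.Set String)) := by
  simp [pvF, pvKeyset]

theorem pvKeyset_append_singleton (K : Int) (g : List String) (kk : String) :
    pvKeyset K (g ++ [kk]) =
      PySem.Set.add (PySem.Set.add (pvKeyset K g) (pvKeys K kk).1) (pvKeys K kk).2 := by
  simp only [pvKeyset, List.flatMap_append, List.flatMap_cons, List.flatMap_nil, List.append_nil,
    pvKeyList]
  rw [show g.flatMap (pvKeyList K) ++ [(pvKeys K kk).1, (pvKeys K kk).2]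
      = (g.flatMap (pvKeyList K) ++ [(pvKeys K kk).1]) ++ [(pvKeys K kk).2] by simp,
    PySem.Set.ofList_append_singleton, PySem.Set.ofList_append_singleton]

theorem pvUpdate_ofList {α : Type} [BEq α] [LawfulBEq α] (s : PySem.Set α) (xs : List α) :
    PySem.Set.update s (PySem.Set.ofList xs) = PySem.Set.update s xs := by
  rw [PySem.Set.update_eq_append_filter, PySem.Set.update_eq_append_filter,
    PySem.Set.ofList_ofList]

theorem pvKeyset_concat (K : Int) (t g : List String) :
    pvKeyset K (t ++ g) = PySem.Set.update (pvKeyset K t) (pvKeyset K g) := by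
  simp only [pvKeyset, List.flatMap_append]
  rw [PySem.Set.ofList_append, pvUpdate_ofList]

theorem pvGroupTest (K : Int) (kk : String) (g : List String)
    (hkk : PySem.Str.len kk = K) (hg : ∀ x ∈ g, PySem.Str.len x = K) :
    (PySem.Set.contains (pvKeyset K g) (pvKeys K kk).1
      || PySem.Set.contains (pvKeyset K g) (pvKeys K kk).2)
    = g.any (fun gk => decide (overlapping_substring_length kk gk (K-1) ≥ K-1)) := by
  rw [PySem.List.any_congr_mem
    (g := fun gk => ((pvKeys K kk).1 == (pvKeys K gk).1 || (pvKeys K kk).1 == (pvKeys K gk).2 ||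
       (pvKeys K kk).2 == (pvKeys K gk).1 || (pvKeys K kk).2 == (pvKeys K gk).2))
    (fun gk hgk => pvCond_eq K kk gk hkk (hg gk hgk))]
  rw [Bool.eq_iff_iff]
  simp only [Bool.or_eq_true, PySem.Set.contains_iff, pvKeyset, PySem.Set.mem_ofList,
    List.mem_flatMap, pvKeyList, List.mem_cons, List.not_mem_nil, or_false,
    List.any_eq_true, beq_iff_eq]
  constructor
  · rintro (⟨gk, hgk, h⟩ | ⟨gk, hgk, h | h⟩)
    · exact ⟨gk, hgk, Or.inl (Or.inl h)⟩
    · exact ⟨gk, hgk, Or.inl (Or.inr h)⟩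
    · exact ⟨gk, hgk, Or.inr h⟩
  · rintro ⟨gk, hgk, (h | h) | h⟩
    · exact Or.inl ⟨gk, hgk, h⟩
    · exact Or.inr ⟨gk, hgk, Or.inl h⟩
    · exact Or.inr ⟨gk, hgk, Or.inr h⟩

-- ===== generic congruence / commutation helpers =====
theorem pvFindIdx?_congr {α : Type} (l : List α) (p q : α → Bool)
    (h : ∀ x ∈ l, p x = q x) : l.findIdx? p = l.findIdx? q := by
  induction l with
  | nil => rfl
  | cons a t ih =>
    rw [List.findIdx?_cons, List.findIdx?_cons, h a (by simp),
      ih (fun x hx => h x (by simp [hx]))]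

theorem pvFindSome?_congr {α β : Type} (l : List α) (f g : α → Option β)
    (h : ∀ x ∈ l, f x = g x) : l.findSome? f = l.findSome? g := by
  induction l with
  | nil => rfl
  | cons a t ih =>
    rw [List.findSome?_cons, List.findSome?_cons, h a (by simp),
      ih (fun x hx => h x (by simp [hx]))]

theorem pvFind?_congr {α : Type} (l : List α) (p q : α → Bool)
    (h : ∀ x ∈ l, p x = q x) : l.find? p = l.find? q := by
  induction l with
  | nil => rfl
  | cons a t ih =>
    rw [List.find?_cons, List.find?_cons, h a (by simp),
      ih (fun x hx => h x (by simp [hx]))]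

theorem pvMap_modify {α β : Type} (f : α → β) (g : α → α) (g' : β → β)
    (h : ∀ a, f (g a) = g' (f a)) : ∀ (l : List α) (i : Nat),
    (l.modify i g).map f = (l.map f).modify i g' := by
  intro l
  induction l with
  | nil => intro i; simp [List.modify_nil]
  | cons a t ih =>
    intro i
    cases i with
    | zero => simp [List.modify_cons, h]
    | succ n => simp [ih n]

theorem pvMem_modify {α : Type} (g : α → α) : ∀ (l : List α) (i : Nat) (x : α),
    x ∈ l.modify i g → x ∈ l ∨ ∃ a ∈ l, x = g a := by
  intro l
  induction l with
  | nil => intro i x hx; simp [List.modify_nil] at hx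
  | cons a t ih =>
    intro i x hx
    cases i with
    | zero =>
      simp [List.modify_cons] at hx
      rcases hx with h | h
      · exact Or.inr ⟨a, by simp, h⟩
      · exact Or.inl (by simp [h])
    | succ n =>
      simp at hx
      rcases hx with h | h
      · exact Or.inl (by simp [h])
      · rcases ih n x h with h2 | ⟨b, hb, he⟩
        · exact Or.inl (by simp [h2])
        · exact Or.inr ⟨b, by simp [hb], he⟩

-- ===== sorting commutes with map =====
theorem pvInsertBy_map {α β : Type} (f : α → β) (bef : β → β → Bool) (x : α) :
    ∀ (ys : List α),
    PySem.List.insertBy bef (f x) (ys.map f)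
      = (PySem.List.insertBy (fun a b => bef (f a) (f b)) x ys).map f := by
  intro ys
  induction ys with
  | nil => rfl
  | cons y t ih =>
    simp only [List.map_cons, PySem.List.insertBy]
    by_cases h : bef (f x) (f y)
    · simp [h]
    · simp [h, ih]

theorem pvSorted_map {α β κ : Type} [LT κ] [DecidableLT κ] (f : α → β) (key : β → κ)
    (xs : List α) :
    PySem.List.sorted (xs.map f) key false
      = (PySem.List.sorted xs (fun x => key (f x)) false).map f := by
  rw [PySem.List.sorted_eq_foldl_insertBy, PySem.List.sorted_eq_foldl_insertBy]
  suffices h : ∀ (acc : List α),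
      ((xs.map f).foldl (fun acc x => PySem.List.insertBy (fun a b => decide (key a < key b)) x acc) (acc.map f))
        = (xs.foldl (fun acc x => PySem.List.insertBy (fun a b => decide (key (f a) < key (f b))) x acc) acc).map f by
    simpa using h []
  induction xs with
  | nil => intro acc; rfl
  | cons x t ih =>
    intro acc
    simp only [List.map_cons, List.foldl_cons]
    rw [pvInsertBy_map f _ x acc, ih]

-- ===== enumerate facts =====
theorem pvEnumerate_map {α β : Type} (f : α → β) :
    ∀ (xs : List α) (s : Int),
    PySem.List.enumerate (xs.map f) s = (PySem.List.enumerate xs s).map (fun p => (p.1, f p.2)) := by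
  intro xs
  induction xs with
  | nil => intro s; rfl
  | cons x t ih => intro s; simp [PySem.List.enumerate, ih]

theorem pvEnumerate_lb {α : Type} :
    ∀ (xs : List α) (s : Int) (p : Int × α), p ∈ PySem.List.enumerate xs s → s ≤ p.1 := by
  intro xs
  induction xs with
  | nil => intro s p hp; simp [PySem.List.enumerate] at hp
  | cons x t ih =>
    intro s p hp
    simp only [PySem.List.enumerate, List.mem_cons] at hp
    rcases hp with rfl | hp
    · omega
    · have := ih (s + 1) p hp; omega

theorem pvMem_enumerate {α : Type} [Inhabited α] :
    ∀ (xs : List α) (p : Int × α), p ∈ PySem.List.enumerate xs 0 →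
      PySem.List.pyGetD xs p.1 default = p.2 := by
  suffices h : ∀ (xs : List α) (s : Int) (p : Int × α), 0 ≤ s → p ∈ PySem.List.enumerate xs s →
      PySem.List.pyGetD xs (p.1 - s) default = p.2 by
    intro xs p hp
    simpa using h xs 0 p le_rfl hp
  intro xs
  induction xs with
  | nil => intro s p hs hp; simp [PySem.List.enumerate] at hp
  | cons x t ih =>
    intro s p hs hp
    simp only [PySem.List.enumerate, List.mem_cons] at hp
    rcases hp with rfl | hp
    · simp
    · have h2 := ih (s + 1) p (by omega) hp
      have hs1 : s + 1 ≤ p.1 := pvEnumerate_lb t (s + 1) p hp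
      rw [show p.1 - s = (p.1 - (s+1)) + 1 by ring] at *
      rw [← h2]
      have h3 : p.1 - (s + 1) = ((p.1 - (s+1)).toNat : Int) := by omega
      rw [h3]
      rw [PySem.List.pyGetD_natCast, show ((p.1 - (s+1)).toNat : Int) + 1 = (((p.1 - (s+1)).toNat + 1 : Nat) : Int) by push_cast; ring, PySem.List.pyGetD_natCast]
      simp

-- ===== A's index-based reorder = direct stable sort of the groups =====
theorem pvReorderPairs (gs : List (List String)) (key : Int → Int) :
    PySem.List.sorted (PySem.List.enumerate (gs.map (fun g => PySem.List.len g))) (fun x => key x.2) false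
    = (PySem.List.sorted (PySem.List.enumerate gs) (fun p => key (PySem.List.len p.2)) false).map
        (fun p => (p.1, PySem.List.len p.2)) := by
  rw [show PySem.List.enumerate (gs.map (fun g => PySem.List.len g))
      = (PySem.List.enumerate gs).map (fun p => (p.1, PySem.List.len p.2)) from
    pvEnumerate_map (fun g => PySem.List.len g) gs 0]
  exact pvSorted_map (fun p : Int × List String => (p.1, PySem.List.len p.2)) (fun x => key x.2) _

theorem pvReorderFst (gs : List (List String)) (key : Int → Int) :
    (PySem.List.sorted (PySem.List.enumerate (gs.map (fun g => PySem.List.len g))) (fun x => key x.2) false).map (fun x => x.1)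
    = (PySem.List.sorted (PySem.List.enumerate gs) (fun p => key (PySem.List.len p.2)) false).map
        (fun p => p.1) := by
  rw [pvReorderPairs, List.map_map]
  rfl

theorem pvSortedSnd (gs : List (List String)) (key : Int → Int) :
    (PySem.List.sorted (PySem.List.enumerate gs) (fun p => key (PySem.List.len p.2)) false).map
        (fun p => p.2)
      = PySem.List.sorted gs (fun g => key (PySem.List.len g)) false := by
  have h := pvSorted_map (fun p : Int × List String => p.2)
    (fun g => key (PySem.List.len g)) (PySem.List.enumerate gs)
  rw [show (PySem.List.enumerate gs).map (fun p : Int × List String => p.2) = gs from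
    PySem.List.map_snd_enumerate gs 0] at h
  exact h.symm

theorem pvSortedGet (gs : List (List String)) (key : Int → Int) :
    ∀ p ∈ PySem.List.sorted (PySem.List.enumerate gs) (fun p => key (PySem.List.len p.2)) false,
      PySem.List.pyGetD gs p.1 [] = p.2 := by
  intro p hp
  exact pvMem_enumerate gs p ((PySem.List.sorted_perm _ _ _).subset hp)

theorem pvReorder (gs : List (List String)) (key : Int → Int) :
    ((PySem.List.sorted (PySem.List.enumerate (gs.map (fun g => PySem.List.len g))) (fun x => key x.2) false).map (fun x => x.1)).map
        (fun i => PySem.List.pyGetD gs i [])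
    = PySem.List.sorted gs (fun g => key (PySem.List.len g)) false := by
  rw [pvReorderFst, List.map_map]
  show (PySem.List.sorted (PySem.List.enumerate gs) (fun p => key (PySem.List.len p.2)) false).map
      (fun p => PySem.List.pyGetD gs p.1 []) = _
  rw [List.map_congr_left (fun p hp => pvSortedGet gs key p hp)]
  exact pvSortedSnd gs key

theorem pvReorderFilter (gs : List (List String)) (key : Int → Int) :
    (((PySem.List.sorted (PySem.List.enumerate (gs.map (fun g => PySem.List.len g))) (fun x => key x.2) false).map (fun x => x.1)).filter
        (fun i => decide (0 < PySem.List.len (PySem.List.pyGetD gs i [])))).map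
        (fun i => PySem.List.pyGetD gs i [])
    = (PySem.List.sorted gs (fun g => key (PySem.List.len g)) false).filter
        (fun g => decide (0 < PySem.List.len g)) := by
  rw [pvReorderFst, List.filter_map, List.map_map]
  show List.map (fun p : Int × List String => PySem.List.pyGetD gs p.1 [])
      ((PySem.List.sorted (PySem.List.enumerate gs) (fun p => key (PySem.List.len p.2)) false).filter
        (fun p => decide (0 < PySem.List.len (PySem.List.pyGetD gs p.1 [])))) = _
  rw [List.filter_congr (q := fun p : Int × List String => decide (0 < PySem.List.len p.2))
    (fun p hp => by rw [pvSortedGet gs key p hp])]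
  rw [List.map_congr_left (fun p hp =>
    pvSortedGet gs key p (List.mem_of_mem_filter hp))]
  show List.map (fun p : Int × List String => p.2)
      ((PySem.List.sorted (PySem.List.enumerate gs) (fun p => key (PySem.List.len p.2)) false).filter
        ((fun g : List String => decide (0 < PySem.List.len g)) ∘ (fun p => p.2))) = _
  rw [← List.filter_map, pvSortedSnd gs key]

-- ===== phase 1: B's fold is the pvF-image of A's fold =====
theorem pvF_append_singleton (K : Int) (g : List String) (kk : String) :
    pvF K (g ++ [kk])
      = ((pvF K g).1 ++ [kk],
          PySem.Set.add (PySem.Set.add (pvF K g).2 (pvKeys K kk).1) (pvKeys K kk).2) := by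
  simp only [pvF]
  exact Prod.ext rfl (pvKeyset_append_singleton K g kk)

theorem pvF_singleton (K : Int) (kk : String) :
    pvF K [kk] = ([kk], PySem.Set.ofList [(pvKeys K kk).1, (pvKeys K kk).2]) := by
  simp [pvF, pvKeyset, pvKeyList]

theorem pvStep1 (K : Int) (kk : String) (s : List (List String))
    (hkk : PySem.Str.len kk = K) (hs : ∀ g ∈ s, ∀ x ∈ g, PySem.Str.len x = K) :
    (match (s.map (pvF K)).findIdx? (fun g => PySem.Set.contains g.2 (pvKeys K kk).1
          || PySem.Set.contains g.2 (pvKeys K kk).2) with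
      | some i => (s.map (pvF K)).modify i (fun g => (g.1 ++ [kk],
          PySem.Set.add (PySem.Set.add g.2 (pvKeys K kk).1) (pvKeys K kk).2))
      | none => (s.map (pvF K)) ++ [([kk], PySem.Set.ofList [(pvKeys K kk).1, (pvKeys K kk).2])])
    = (match s.findIdx? (fun g : List String => g.any (fun gk =>
          decide (overlapping_substring_length kk gk (K - 1) ≥ K - 1))) with
      | some gid => s.modify gid (fun g => g ++ [kk])
      | none => s ++ [[kk]]).map (pvF K) := by
  rw [List.findIdx?_map]
  rw [show ((fun (g : List String × PySem.Set String) =>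
        PySem.Set.contains g.2 (pvKeys K kk).1 || PySem.Set.contains g.2 (pvKeys K kk).2) ∘ pvF K)
      = (fun g : List String => PySem.Set.contains (pvKeyset K g) (pvKeys K kk).1
        || PySem.Set.contains (pvKeyset K g) (pvKeys K kk).2) from rfl]
  rw [pvFindIdx?_congr s _ _ (fun g hg => pvGroupTest K kk g hkk (hs g hg))]
  cases h : s.findIdx? (fun g : List String => g.any (fun gk =>
      decide (overlapping_substring_length kk gk (K - 1) ≥ K - 1))) with
  | none =>
    simp only [List.map_append, List.map_cons, List.map_nil]
    rw [pvF_singleton]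
  | some i =>
    exact (pvMap_modify (pvF K) (fun g => g ++ [kk])
      (fun g => (g.1 ++ [kk], PySem.Set.add (PySem.Set.add g.2 (pvKeys K kk).1) (pvKeys K kk).2))
      (fun g => pvF_append_singleton K g kk) s i).symm

theorem pvStep1_inv (K : Int) (kk : String) (s : List (List String))
    (hkk : PySem.Str.len kk = K) (hs : ∀ g ∈ s, ∀ x ∈ g, PySem.Str.len x = K) :
    ∀ g ∈ (match s.findIdx? (fun g : List String => g.any (fun gk =>
          decide (overlapping_substring_length kk gk (K - 1) ≥ K - 1))) with
      | some gid => s.modify gid (fun g => g ++ [kk])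
      | none => s ++ [[kk]]), ∀ x ∈ g, PySem.Str.len x = K := by
  cases h : s.findIdx? (fun g : List String => g.any (fun gk =>
      decide (overlapping_substring_length kk gk (K - 1) ≥ K - 1))) with
  | none =>
    intro g hg x hx
    rcases List.mem_append.mp hg with hg | hg
    · exact hs g hg x hx
    · simp at hg
      subst hg
      simp at hx
      subst hx
      exact hkk
  | some i =>
    intro g hg x hx
    rcases pvMem_modify _ s i g hg with hg2 | ⟨a, ha, rfl⟩
    · exact hs g hg2 x hx
    · rcases List.mem_append.mp hx with hx | hx
      · exact hs a ha x hx
      · simp at hx; subst hx; exact hkk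

theorem pvPhase1 (K : Int) :
    ∀ (kms : List String) (s : List (List String)),
    (∀ x ∈ kms, PySem.Str.len x = K) →
    (∀ g ∈ s, ∀ x ∈ g, PySem.Str.len x = K) →
    (kms.foldl (fun (gs : List (List String × PySem.Set String)) (kk : String) =>
      match gs.findIdx? (fun g => PySem.Set.contains g.2 (pvKeys K kk).1
          || PySem.Set.contains g.2 (pvKeys K kk).2) with
      | some i => gs.modify i (fun g => (g.1 ++ [kk],
          PySem.Set.add (PySem.Set.add g.2 (pvKeys K kk).1) (pvKeys K kk).2))
      | none => gs ++ [([kk], PySem.Set.ofList [(pvKeys K kk).1, (pvKeys K kk).2])])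
      (s.map (pvF K)))
    = (kms.foldl (fun (gs : List (List String)) (kk : String) =>
      match gs.findIdx? (fun g : List String => g.any (fun gk =>
          decide (overlapping_substring_length kk gk (K - 1) ≥ K - 1))) with
      | some gid => gs.modify gid (fun g => g ++ [kk])
      | none => gs ++ [[kk]]) s).map (pvF K) := by
  intro kms
  induction kms with
  | nil => intro s _ _; rfl
  | cons kk t ih =>
    intro s hk hs
    simp only [List.foldl_cons]
    rw [pvStep1 K kk s (hk kk (by simp)) hs]
    exact ih _ (fun x hx => hk x (by simp [hx]))
      (pvStep1_inv K kk s (hk kk (by simp)) hs)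

theorem pvPhase1_inv (K : Int) :
    ∀ (kms : List String) (s : List (List String)),
    (∀ x ∈ kms, PySem.Str.len x = K) →
    (∀ g ∈ s, ∀ x ∈ g, PySem.Str.len x = K) →
    ∀ g ∈ (kms.foldl (fun (gs : List (List String)) (kk : String) =>
      match gs.findIdx? (fun g : List String => g.any (fun gk =>
          decide (overlapping_substring_length kk gk (K - 1) ≥ K - 1))) with
      | some gid => gs.modify gid (fun g => g ++ [kk])
      | none => gs ++ [[kk]]) s), ∀ x ∈ g, PySem.Str.len x = K := by
  intro kms
  induction kms with
  | nil => intro s _ hs; exact hs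
  | cons kk t ih =>
    intro s hk hs
    simp only [List.foldl_cons]
    exact ih _ (fun x hx => hk x (by simp [hx]))
      (pvStep1_inv K kk s (hk kk (by simp)) hs)

-- ===== phase 2: merge pass =====
def pvAStep2 (K : Int) (gs : List (List String)) (gid : Int) : List (List String) :=
  match (PySem.List.pyGetD gs gid []).findSome? (fun kk =>
      (PySem.List.pyRange (PySem.List.len gs - 1) gid (-1)).find? (fun nid =>
        (PySem.List.pyGetD gs nid []).any (fun nk =>
          decide (overlapping_substring_length kk nk (K - 1) ≥ K - 1)))) with
  | some nid => PySem.List.pySetD (PySem.List.pySetD gs nid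
      (PySem.List.pyGetD gs nid [] ++ PySem.List.pyGetD gs gid [])) gid []
  | none => gs

def pvBStep2 (K m : Int) (gs : List (List String × PySem.Set String)) (gid : Int) :
    List (List String × PySem.Set String) :=
  match (PySem.List.pyGetD gs gid ([], [])).1.findSome? (fun kk =>
      (PySem.List.pyRange (m - 1) gid (-1)).find? (fun nid =>
        PySem.Set.contains (PySem.List.pyGetD gs nid ([], [])).2 (pvKeys K kk).1
          || PySem.Set.contains (PySem.List.pyGetD gs nid ([], [])).2 (pvKeys K kk).2)) with
  | some nid => PySem.List.pySetD (PySem.List.pySetD gs nid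
      ((PySem.List.pyGetD gs nid ([], [])).1 ++ (PySem.List.pyGetD gs gid ([], [])).1,
        PySem.Set.update (PySem.List.pyGetD gs nid ([], [])).2 (PySem.List.pyGetD gs gid ([], [])).2))
      gid ([], [])
  | none => gs

theorem pvPyGetD_prop {α : Type} (P : α → Prop) (s : List α) (i : Int) (d : α)
    (hs : ∀ g ∈ s, P g) (hd : P d) : P (PySem.List.pyGetD s i d) := by
  cases h : PySem.List.pyGet? s i with
  | none => rw [PySem.List.pyGetD_of_none s i d h]; exact hd
  | some v =>
    rw [show PySem.List.pyGetD s i d = (PySem.List.pyGet? s i).getD d from rfl, h]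
    exact hs v (PySem.List.mem_of_pyGet?_eq_some s h)

theorem pvPyGetD_map_F (K : Int) (s : List (List String)) (i : Int) :
    PySem.List.pyGetD (s.map (pvF K)) i (([] : List String), ([] : PySem.Set String))
      = pvF K (PySem.List.pyGetD s i []) := by
  rw [← pvF_nil K, PySem.List.pyGetD_map]

theorem pvPySetD_map {α β : Type} (f : α → β) (l : List α) (i : Int) (v : α) (hi : 0 ≤ i) :
    PySem.List.pySetD (l.map f) i (f v) = (PySem.List.pySetD l i v).map f := by
  rw [PySem.List.pySetD_of_nonneg _ _ hi, PySem.List.pySetD_of_nonneg _ _ hi]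
  exact List.map_set.symm

theorem pvMem_pyRange_neg_one (a b x : Int) :
    x ∈ PySem.List.pyRange a b (-1) → b < x ∧ x ≤ a := by
  intro hx
  simp only [PySem.List.pyRange] at hx
  norm_num at hx
  rcases hx with ⟨k, hk, rfl⟩
  split at hk
  · rename_i h
    simp at hk
    omega
  · simp at hk

theorem pvStep2 (K m : Int) (s : List (List String)) (gid : Int)
    (hgid : 0 ≤ gid) (hm : (s.length : Int) = m)
    (hs : ∀ g ∈ s, ∀ x ∈ g, PySem.Str.len x = K) :
    pvBStep2 K m (s.map (pvF K)) gid = (pvAStep2 K s gid).map (pvF K) := by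
  unfold pvBStep2 pvAStep2
  have hlen : PySem.List.len s = m := by
    rw [PySem.List.len_eq]; exact hm
  have hscrut :
      (PySem.List.pyGetD (s.map (pvF K)) gid ([], [])).1.findSome? (fun kk =>
        (PySem.List.pyRange (m - 1) gid (-1)).find? (fun nid =>
          PySem.Set.contains (PySem.List.pyGetD (s.map (pvF K)) nid ([], [])).2 (pvKeys K kk).1
            || PySem.Set.contains (PySem.List.pyGetD (s.map (pvF K)) nid ([], [])).2 (pvKeys K kk).2))
      = (PySem.List.pyGetD s gid []).findSome? (fun kk =>
        (PySem.List.pyRange (PySem.List.len s - 1) gid (-1)).find? (fun nid =>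
          (PySem.List.pyGetD s nid []).any (fun nk =>
            decide (overlapping_substring_length kk nk (K - 1) ≥ K - 1)))) := by
    rw [pvPyGetD_map_F K s gid]
    simp only [pvF, hlen]
    apply pvFindSome?_congr
    intro kk hkk
    have hkkK : PySem.Str.len kk = K :=
      pvPyGetD_prop (fun g => ∀ x ∈ g, PySem.Str.len x = K) s gid [] hs (by simp) kk hkk
    apply pvFind?_congr
    intro nid _
    rw [pvPyGetD_map_F K s nid]
    simp only [pvF]
    exact pvGroupTest K kk (PySem.List.pyGetD s nid []) hkkK
      (pvPyGetD_prop (fun g => ∀ x ∈ g, PySem.Str.len x = K) s nid [] hs (by simp))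
  rw [hscrut]
  cases h : (PySem.List.pyGetD s gid []).findSome? (fun kk =>
      (PySem.List.pyRange (PySem.List.len s - 1) gid (-1)).find? (fun nid =>
        (PySem.List.pyGetD s nid []).any (fun nk =>
          decide (overlapping_substring_length kk nk (K - 1) ≥ K - 1)))) with
  | none => rfl
  | some nid =>
    simp only []
    have hnid : 0 ≤ nid := by
      obtain ⟨kk, _, hkk⟩ := List.exists_of_findSome?_eq_some h
      have hmem := List.mem_of_find?_eq_some hkk
      have := pvMem_pyRange_neg_one _ _ _ hmem
      omega
    rw [pvPyGetD_map_F K s nid, pvPyGetD_map_F K s gid]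
    simp only [pvF]
    rw [show ((PySem.List.pyGetD s nid [] : List String) ++ PySem.List.pyGetD s gid [],
        PySem.Set.update (pvKeyset K (PySem.List.pyGetD s nid []))
          (pvKeyset K (PySem.List.pyGetD s gid [])))
      = pvF K (PySem.List.pyGetD s nid [] ++ PySem.List.pyGetD s gid []) from by
        simp [pvF, pvKeyset_concat]]
    rw [show (([] : List String), ([] : PySem.Set String)) = pvF K [] from (pvF_nil K).symm]
    rw [pvPySetD_map (pvF K) s nid _ hnid,
      pvPySetD_map (pvF K) _ gid _ hgid]

theorem pvStep2_len (K : Int) (s : List (List String)) (gid : Int) :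
    (pvAStep2 K s gid).length = s.length := by
  unfold pvAStep2
  cases h : (PySem.List.pyGetD s gid []).findSome? (fun kk =>
      (PySem.List.pyRange (PySem.List.len s - 1) gid (-1)).find? (fun nid =>
        (PySem.List.pyGetD s nid []).any (fun nk =>
          decide (overlapping_substring_length kk nk (K - 1) ≥ K - 1)))) with
  | none => rfl
  | some nid => simp [PySem.List.length_pySetD]

theorem pvStep2_inv (K : Int) (s : List (List String)) (gid : Int) (hgid : 0 ≤ gid)
    (hs : ∀ g ∈ s, ∀ x ∈ g, PySem.Str.len x = K) :
    ∀ g ∈ pvAStep2 K s gid, ∀ x ∈ g, PySem.Str.len x = K := by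
  unfold pvAStep2
  cases h : (PySem.List.pyGetD s gid []).findSome? (fun kk =>
      (PySem.List.pyRange (PySem.List.len s - 1) gid (-1)).find? (fun nid =>
        (PySem.List.pyGetD s nid []).any (fun nk =>
          decide (overlapping_substring_length kk nk (K - 1) ≥ K - 1)))) with
  | none => exact hs
  | some nid =>
    simp only []
    have hnid : 0 ≤ nid := by
      obtain ⟨kk, _, hkk⟩ := List.exists_of_findSome?_eq_some h
      have hmem := List.mem_of_find?_eq_some hkk
      have := pvMem_pyRange_neg_one _ _ _ hmem
      omega
    intro y hy z hz
    rw [PySem.List.pySetD_of_nonneg _ _ hgid] at hy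
    rcases List.mem_or_eq_of_mem_set hy with hy2 | rfl
    · rw [PySem.List.pySetD_of_nonneg _ _ hnid] at hy2
      rcases List.mem_or_eq_of_mem_set hy2 with hy3 | rfl
      · exact hs y hy3 z hz
      · rcases List.mem_append.mp hz with hz2 | hz2
        · exact pvPyGetD_prop (fun g => ∀ x ∈ g, PySem.Str.len x = K) s nid [] hs
            (by simp) z hz2
        · exact pvPyGetD_prop (fun g => ∀ x ∈ g, PySem.Str.len x = K) s gid [] hs
            (by simp) z hz2
    · simp at hz

theorem pvPhase2 (K m : Int) :
    ∀ (L : List Int) (s : List (List String)),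
    (∀ x ∈ L, 0 ≤ x) → ((s.length : Int) = m) →
    (∀ g ∈ s, ∀ x ∈ g, PySem.Str.len x = K) →
    L.foldl (pvBStep2 K m) (s.map (pvF K)) = (L.foldl (pvAStep2 K) s).map (pvF K) := by
  intro L
  induction L with
  | nil => intro s _ _ _; rfl
  | cons gid t ih =>
    intro s hL hm hs
    simp only [List.foldl_cons]
    rw [pvStep2 K m s gid (hL gid (by simp)) hm hs]
    exact ih _ (fun x hx => hL x (by simp [hx]))
      (by rw [pvStep2_len]; exact hm)
      (pvStep2_inv K s gid (hL gid (by simp)) hs)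

-- ===== specialized wrappers (definitional instances of the general lemmas) =====
theorem pvSortAlt (K : Int) (gs : List (List String)) :
    PySem.List.sorted (gs.map (pvF K)) (fun g => PySem.List.len g.1) false
      = (PySem.List.sorted gs (fun g => PySem.List.len g) false).map (pvF K) :=
  pvSorted_map (pvF K) (fun g => PySem.List.len g.1) gs

theorem pvSortAltDesc (K : Int) (gs : List (List String)) :
    PySem.List.sorted (gs.map (pvF K)) (fun g => -(PySem.List.len g.1)) false
      = (PySem.List.sorted gs (fun g => -(PySem.List.len g)) false).map (pvF K) :=
  pvSorted_map (pvF K) (fun g => -(PySem.List.len g.1)) gs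

theorem pvReorderAsc (gs : List (List String)) :
    ((PySem.List.sorted (PySem.List.enumerate (gs.map (fun g => PySem.List.len g))) (fun x => x.2) false).map (fun x => x.1)).map
        (fun i => PySem.List.pyGetD gs i [])
    = PySem.List.sorted gs (fun g => PySem.List.len g) false :=
  pvReorder gs (fun i => i)

theorem pvReorderDescFilter (gs : List (List String)) :
    (((PySem.List.sorted (PySem.List.enumerate (gs.map (fun g => PySem.List.len g))) (fun x => -x.2) false).map (fun x => x.1)).filter
        (fun i => decide (0 < PySem.List.len (PySem.List.pyGetD gs i [])))).map
        (fun i => PySem.List.pyGetD gs i [])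
    = (PySem.List.sorted gs (fun g => -(PySem.List.len g)) false).filter
        (fun g => decide (0 < PySem.List.len g)) :=
  pvReorderFilter gs (fun i => -i)

theorem pvExtractB (K : Int) (X : List (List String)) :
    ((X.map (pvF K)).filter (fun g => !g.1.isEmpty)).map (fun g => g.1)
      = X.filter (fun g => !g.isEmpty) := by
  rw [List.filter_map, List.map_map]
  show (X.filter (fun g : List String => !g.isEmpty)).map (fun g => g) = _
  simp

theorem pvFilterPos (X : List (List String)) :
    X.filter (fun g => decide (0 < PySem.List.len g)) = X.filter (fun g => !g.isEmpty) := by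
  apply List.filter_congr
  intro g _
  cases g with
  | nil => simp [PySem.List.len_eq]
  | cons a t => simp [PySem.List.len_eq]

theorem pvPhase2' (K m : Int) (L : List Int) (s : List (List String))
    (h1 : ∀ x ∈ L, 0 ≤ x) (h2 : (s.length : Int) = m)
    (h3 : ∀ g ∈ s, ∀ x ∈ g, PySem.Str.len x = K) :
    L.foldl (fun gs gid =>
      match (PySem.List.pyGetD gs gid (([] : List String), ([] : PySem.Set String))).1.findSome? (fun kk =>
          (PySem.List.pyRange (m - 1) gid (-1)).find? (fun nid =>
            PySem.Set.contains (PySem.List.pyGetD gs nid ([], [])).2 (pvKeys K kk).1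
              || PySem.Set.contains (PySem.List.pyGetD gs nid ([], [])).2 (pvKeys K kk).2)) with
      | some nid => PySem.List.pySetD (PySem.List.pySetD gs nid
          ((PySem.List.pyGetD gs nid ([], [])).1 ++ (PySem.List.pyGetD gs gid ([], [])).1,
            PySem.Set.update (PySem.List.pyGetD gs nid ([], [])).2 (PySem.List.pyGetD gs gid ([], [])).2))
          gid ([], [])
      | none => gs) (s.map (pvF K))
    = (L.foldl (fun gs gid =>
      match (PySem.List.pyGetD gs gid []).findSome? (fun kk =>
          (PySem.List.pyRange (PySem.List.len gs - 1) gid (-1)).find? (fun nid =>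
            (PySem.List.pyGetD gs nid []).any (fun nk =>
              decide (overlapping_substring_length kk nk (K - 1) ≥ K - 1)))) with
      | some nid => PySem.List.pySetD (PySem.List.pySetD gs nid
          (PySem.List.pyGetD gs nid [] ++ PySem.List.pyGetD gs gid [])) gid []
      | none => gs) s).map (pvF K) := by
  show L.foldl (pvBStep2 K m) (s.map (pvF K)) = (L.foldl (pvAStep2 K) s).map (pvF K)
  exact pvPhase2 K m L s h1 h2 h3

-- ===== assembly =====
theorem pvMainNE (k0 : String) (rest : List String)
    (hall : ∀ s ∈ (k0 :: rest), PySem.Str.len s = PySem.Str.len k0) :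
    group_kmers (k0 :: rest) = group_kmers_alt (k0 :: rest) := by
  have hallb : ((k0 :: rest).all fun seq => PySem.Str.len seq == PySem.Str.len k0) = true := by
    simp only [List.all_eq_true, beq_iff_eq]
    exact hall
  have hanyb : ((k0 :: rest).any fun s => !(PySem.Str.len s == PySem.Str.len k0)) = false := by
    simp only [List.any_eq_false]
    intro x hx
    have h := hall x hx
    simp at h ⊢
    exact h
  simp only [group_kmers, group_kmers_alt, hallb, hanyb, Bool.not_true, Bool.false_eq_true,
    if_false]
  rw [show List.foldl
      (fun (gs : List (List String × PySem.Set String)) (kk : String) =>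
        match gs.findIdx? (fun g => PySem.Set.contains g.2 (pvKeys (PySem.Str.len k0) kk).1
            || PySem.Set.contains g.2 (pvKeys (PySem.Str.len k0) kk).2) with
        | some i => gs.modify i (fun g => (g.1 ++ [kk],
            PySem.Set.add (PySem.Set.add g.2 (pvKeys (PySem.Str.len k0) kk).1) (pvKeys (PySem.Str.len k0) kk).2))
        | none => gs ++ [([kk], PySem.Set.ofList [(pvKeys (PySem.Str.len k0) kk).1, (pvKeys (PySem.Str.len k0) kk).2])])
      [] (k0 :: rest)
    = List.foldl
      (fun (gs : List (List String × PySem.Set String)) (kk : String) =>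
        match gs.findIdx? (fun g => PySem.Set.contains g.2 (pvKeys (PySem.Str.len k0) kk).1
            || PySem.Set.contains g.2 (pvKeys (PySem.Str.len k0) kk).2) with
        | some i => gs.modify i (fun g => (g.1 ++ [kk],
            PySem.Set.add (PySem.Set.add g.2 (pvKeys (PySem.Str.len k0) kk).1) (pvKeys (PySem.Str.len k0) kk).2))
        | none => gs ++ [([kk], PySem.Set.ofList [(pvKeys (PySem.Str.len k0) kk).1, (pvKeys (PySem.Str.len k0) kk).2])])
      (List.map (pvF (PySem.Str.len k0)) [[k0]]) rest from rfl]
  rw [pvPhase1 (PySem.Str.len k0) rest [[k0]]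
    (fun x hx => hall x (by simp [hx]))
    (by intro g hg x hx; simp at hg; subst hg; simp at hx; subst hx; rfl)]
  have hG1inv := pvPhase1_inv (PySem.Str.len k0) rest [[k0]]
    (fun x hx => hall x (by simp [hx]))
    (by intro g hg x hx; simp at hg; subst hg; simp at hx; subst hx; rfl)
  generalize hG1 : List.foldl
      (fun (gs : List (List String)) (kk : String) =>
        match gs.findIdx? (fun g : List String => g.any (fun gk =>
            decide (overlapping_substring_length kk gk (PySem.Str.len k0 - 1) ≥ PySem.Str.len k0 - 1))) with
        | some gid => gs.modify gid (fun g => g ++ [kk])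
        | none => gs ++ [[kk]])
      [[k0]] rest = G1 at hG1inv ⊢
  rw [pvSortAlt (PySem.Str.len k0) G1, pvReorderAsc G1]
  have hG2inv : ∀ g ∈ PySem.List.sorted G1 (fun g => PySem.List.len g) false,
      ∀ x ∈ g, PySem.Str.len x = PySem.Str.len k0 :=
    fun g hg => hG1inv g ((PySem.List.sorted_perm _ _ _).subset hg)
  generalize hG2 : PySem.List.sorted G1 (fun g => PySem.List.len g) false = G2 at hG2inv ⊢
  rw [show PySem.List.len (List.map (pvF (PySem.Str.len k0)) G2) = PySem.List.len G2 from by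
    simp [PySem.List.len_eq]]
  rw [pvPhase2' (PySem.Str.len k0) (PySem.List.len G2)
    (PySem.List.pyRange 0 (PySem.List.len G2 - 1) 1) G2
    (fun x hx => (PySem.List.mem_pyRange_one.mp hx).1)
    (by simp [PySem.List.len_eq])
    hG2inv]
  generalize hG3 : List.foldl
      (fun (gs : List (List String)) (gid : Int) =>
        match (PySem.List.pyGetD gs gid []).findSome? (fun kk =>
            (PySem.List.pyRange (PySem.List.len gs - 1) gid (-1)).find? (fun nid =>
              (PySem.List.pyGetD gs nid []).any (fun nk =>
                decide (overlapping_substring_length kk nk (PySem.Str.len k0 - 1) ≥ PySem.Str.len k0 - 1)))) with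
        | some nid => PySem.List.pySetD (PySem.List.pySetD gs nid
            (PySem.List.pyGetD gs nid [] ++ PySem.List.pyGetD gs gid [])) gid []
        | none => gs)
      G2 (PySem.List.pyRange 0 (PySem.List.len G2 - 1) 1) = G3
  rw [pvSortAltDesc (PySem.Str.len k0) G3, pvReorderDescFilter G3, pvExtractB, pvFilterPos]

-- ===== VERDICT (by name: the statement is the Claim_ definition above) =====
theorem group_kmers_spec : Claim_equal_group_kmers := by
  intro kmers _ hpre
  obtain ⟨hne, hlen⟩ := hpre
  unfold Spec_group_kmers
  cases kmers with
  | nil => exact absurd rfl hne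
  | cons k0 rest => exact pvMainNE k0 rest hlen
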